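-- pv_equiv track=rewrite | github.com/Teeeeg/AlgorithmOA | OnSite/Aug26MS1.py | solutionCore
-- ===== SOURCE A (Python) =====
-- def solutionCore(S, start, end):
--     if end - start + 1 < 2:
--         return 0
--
--     counter = [0] * 26
--     for i in range(start, end + 1):
--         index = ord(S[i]) - ord('a')
--         counter[index] += 1
--
--     for i in range(start, end + 1):
--         index = ord(S[i]) - ord('a')
--
--         if counter[index] % 2:
--             return max(solutionCore(S, start, i - 1), solutionCore(S, i + 1, end))
--
--     return end - start + 1
-- ===== SOURCE B (Python) =====
-- def solutionCore(S, start, end):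
--     # positions of each character, in increasing order (built once per call)
--     pos = {}
--     for j, ch in enumerate(S):
--         pos.setdefault(ch, []).append(j)
--
--     def bisect_left(a, x):
--         # CPython's bisect.bisect_left loop (the module cannot be imported here)
--         lo, hi = 0, len(a)
--         while lo < hi:
--             mid = (lo + hi) // 2
--             if a[mid] < x:
--                 lo = mid + 1
--             else:
--                 hi = mid
--         return lo
--
--     def solve(lo, hi):
--         if hi - lo + 1 < 2:
--             return 0
--         best = None
--         for ch in pos:
--             lst = pos[ch]
--             a = bisect_left(lst, lo)
--             b = bisect_left(lst, hi + 1)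
--             if (b - a) % 2:
--                 j = lst[a]  # first occurrence of ch at index >= lo
--                 if best is None or j < best:
--                     best = j
--         if best is None:
--             return hi - lo + 1
--         return max(solve(lo, best - 1), solve(best + 1, hi))
--
--     return solve(start, end)
-- ===== Notes on version B (the rewrite author's own statement) =====
-- stated objective: alternative
-- what changed: B precomputes one sorted position list per character and, per recursive window, obtains each character's window parity and first occurrence by binary search (no per-window counting or scanning loops), instead of A's per-window 26-counter pass plus a second scan for the first odd character.
-- outside the precondition, e.g. on solutionCore('aG', 0, 1): A returns 2, B returns 0; on solutionCore('ab', -2, -1): A returns 0, B returns 2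
import Mathlib
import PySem

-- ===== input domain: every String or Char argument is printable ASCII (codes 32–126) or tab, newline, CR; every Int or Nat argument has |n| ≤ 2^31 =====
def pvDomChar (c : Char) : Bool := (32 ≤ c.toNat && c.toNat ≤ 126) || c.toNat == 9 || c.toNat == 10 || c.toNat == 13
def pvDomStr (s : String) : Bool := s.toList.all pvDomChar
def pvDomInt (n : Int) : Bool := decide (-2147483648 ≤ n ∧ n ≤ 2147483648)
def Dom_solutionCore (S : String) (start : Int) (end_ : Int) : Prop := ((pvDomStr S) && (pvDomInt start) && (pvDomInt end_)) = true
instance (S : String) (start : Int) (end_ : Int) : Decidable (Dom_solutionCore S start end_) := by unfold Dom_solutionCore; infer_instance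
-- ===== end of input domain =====

-- B (alternative algorithm): per-letter sorted position lists built once + binary search per
-- window for parity and first occurrence, instead of A's per-window counting pass and
-- scanning pass.

-- ===== PORT A =====

-- ord(S[i]) - ord('a')
def pvIdx (ch : Char) : Int := (ch.toNat : Int) - 97

-- A's second loop: first index i (of the given index list) whose character has an odd counter entry
def pvFindOdd (L : List Char) (counter : List Int) : List Int → Option Int
  | [] => none
  | i :: rest =>
    if PySem.Int.mod (PySem.List.pyGetD counter (pvIdx (PySem.List.pyGetD L i 'a')) 0) 2 ≠ 0 then
      some i
    else pvFindOdd L counter rest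

theorem pvFindOdd_mem (L : List Char) (counter : List Int) :
    ∀ (l : List Int) (i : Int), pvFindOdd L counter l = some i → i ∈ l := by
  intro l
  induction l with
  | nil => intro i h; simp [pvFindOdd] at h
  | cons a rest ih =>
    intro i h
    simp only [pvFindOdd] at h
    split at h
    · simp at h; simp [h]
    · exact List.mem_cons_of_mem _ (ih i h)

def solutionCore (S : String) (start : Int) (end_ : Int) : Int :=
  if _h : end_ - start + 1 < 2 then 0
  else
    let L := S.toList
    let counter :=
      (PySem.List.pyRange start (end_ + 1)).foldl
        (fun counter i =>
          PySem.List.pySetD counter (pvIdx (PySem.List.pyGetD L i 'a'))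
            (PySem.List.pyGetD counter (pvIdx (PySem.List.pyGetD L i 'a')) 0 + 1))
        (List.replicate 26 0)
    match _hf : pvFindOdd L counter (PySem.List.pyRange start (end_ + 1)) with
    | some i => max (solutionCore S start (i - 1)) (solutionCore S (i + 1) end_)
    | none => end_ - start + 1
termination_by (end_ - start + 1).toNat
decreasing_by
  · have hi := PySem.List.mem_pyRange_one.mp (pvFindOdd_mem _ _ _ _ _hf)
    omega
  · have hi := PySem.List.mem_pyRange_one.mp (pvFindOdd_mem _ _ _ _ _hf)
    omega

-- ===== PORT B =====

-- pos = {}; for j, ch in enumerate(S): pos.setdefault(ch, []).append(j)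
def pvPos (S : String) : PySem.Dict Char (List Int) :=
  (PySem.List.enumerate S.toList 0).foldl
    (fun d p => d.modify p.2 [] (fun l => l ++ [p.1])) PySem.Dict.empty

-- the body of B's 'for ch in pos' loop (best is the running minimum, None at the start);
-- the hand-written bisect_left in Source B is CPython's bisect.bisect_left loop, ported as
-- PySem.List.bisectLeft (exact)
def pvStep (S : String) (lo hi : Int) (best : Option Int) (ch : Char) : Option Int :=
  let lst := (pvPos S).getD ch []
  let a := PySem.List.bisectLeft lst lo
  let b := PySem.List.bisectLeft lst (hi + 1)
  if PySem.Int.mod ((b : Int) - (a : Int)) 2 ≠ 0 then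
    -- j = lst[a]; index a is in range whenever the parity test fires (see pvStepBound)
    let j := PySem.List.pyGetD lst ((a : Nat) : Int) 0
    match best with
    | none => some j
    | some bst => if j < bst then some j else some bst
  else best

-- the position list B's dict stores for ch, in closed form
theorem pvPos_getD (S : String) (ch : Char) :
    (pvPos S).getD ch [] =
      ((PySem.List.enumerate S.toList 0).filter (fun p => p.2 == ch)).map (fun p => p.1) := by
  have hswap :
      pvPos S = ((PySem.List.enumerate S.toList 0).map Prod.swap).foldl
        (fun d q => d.modify q.1 [] (fun l => l ++ [q.2])) PySem.Dict.empty := by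
    rw [List.foldl_map]
    rfl
  rw [hswap, PySem.Dict.getD_foldl_modify_append, PySem.Dict.getD_empty, List.nil_append,
      List.filter_map]
  rw [List.map_map]
  congr 1

theorem pvPosSorted (S : String) (ch : Char) :
    ((pvPos S).getD ch []).Pairwise (· < ·) := by
  rw [pvPos_getD]
  rw [List.pairwise_map]
  exact (PySem.List.pairwise_lt_enumerate S.toList 0).filter _

theorem pvPosSortedLe (S : String) (ch : Char) :
    ((pvPos S).getD ch []).Pairwise (· ≤ ·) :=
  (pvPosSorted S ch).imp le_of_lt

-- bisectLeft is monotone in the probe on a sorted list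
theorem pvBisectLe (l : List Int) (x y : Int) (hs : l.Pairwise (· ≤ ·)) (hxy : x ≤ y) :
    PySem.List.bisectLeft l x ≤ PySem.List.bisectLeft l y := by
  obtain ⟨hax, h2x, h3x⟩ := PySem.List.bisectLeft_spec l x hs
  obtain ⟨hay, h2y, h3y⟩ := PySem.List.bisectLeft_spec l y hs
  by_contra hlt
  push_neg at hlt
  have hblen : PySem.List.bisectLeft l y < l.length := lt_of_lt_of_le hlt hax
  have h1 := h2x (PySem.List.bisectLeft l y) hblen hlt
  have h2 := h3y (PySem.List.bisectLeft l y) hblen le_rfl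
  omega

-- whenever the parity test fires, lst[a] is a position inside [lo, hi]
theorem pvStepBound (S : String) (lo hi : Int) (hlh : lo ≤ hi) (best : Option Int)
    (hb : ∀ x, best = some x → lo ≤ x ∧ x ≤ hi) (ch : Char) (x' : Int)
    (h : pvStep S lo hi best ch = some x') : lo ≤ x' ∧ x' ≤ hi := by
  simp only [pvStep] at h
  by_cases hpar : PySem.Int.mod
      ((PySem.List.bisectLeft ((pvPos S).getD ch []) (hi + 1) : Int) -
        (PySem.List.bisectLeft ((pvPos S).getD ch []) lo : Int)) 2 ≠ 0
  · rw [if_pos hpar] at h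
    set lst := (pvPos S).getD ch [] with hlst
    set a := PySem.List.bisectLeft lst lo with ha
    set b := PySem.List.bisectLeft lst (hi + 1) with hbdef
    obtain ⟨halen, h2a, h3a⟩ := PySem.List.bisectLeft_spec lst lo (pvPosSortedLe S ch)
    obtain ⟨hblen, h2b, h3b⟩ := PySem.List.bisectLeft_spec lst (hi + 1) (pvPosSortedLe S ch)
    have hab : a ≤ b := pvBisectLe lst lo (hi + 1) (pvPosSortedLe S ch) (by omega)
    have hne : a ≠ b := by
      intro hEq
      have hz : (b : Int) - (a : Int) = 0 := by omega
      rw [hz] at hpar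
      exact hpar rfl
    have haltlen : a < lst.length := by omega
    have hj : PySem.List.pyGetD lst ((a : Nat) : Int) 0 = lst[a] := by
      rw [PySem.List.pyGetD_natCast, List.getD_eq_getElem _ _ haltlen]
    have hjlo : lo ≤ lst[a] := h3a a haltlen le_rfl
    have hjhi : lst[a] < hi + 1 := h2b a haltlen (by omega)
    cases best with
    | none =>
      simp only [hj] at h
      have : x' = lst[a] := by simpa using h.symm
      omega
    | some bst =>
      have hbst := hb bst rfl
      simp only [hj] at h
      split at h
      · have : x' = lst[a] := by simpa using h.symm
        omega
      · have : x' = bst := by simpa using h.symm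
        omega
  · rw [if_neg hpar] at h
    exact hb x' h

theorem pvBestBound (S : String) (lo hi : Int) (hlh : lo ≤ hi) :
    ∀ (keys : List Char) (acc : Option Int), (∀ x, acc = some x → lo ≤ x ∧ x ≤ hi) →
      ∀ (i : Int), keys.foldl (pvStep S lo hi) acc = some i → lo ≤ i ∧ i ≤ hi := by
  intro keys
  induction keys with
  | nil => intro acc hacc i h; exact hacc i h
  | cons ch t ih =>
    intro acc hacc i h
    refine ih (pvStep S lo hi acc ch) ?_ i h
    intro x hx
    exact pvStepBound S lo hi hlh acc hacc ch x hx

def solutionCore_alt (S : String) (start : Int) (end_ : Int) : Int :=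
  if _h : end_ - start + 1 < 2 then 0
  else
    match _hb : ((pvPos S).keys).foldl (pvStep S start end_) none with
    | none => end_ - start + 1
    | some i => max (solutionCore_alt S start (i - 1)) (solutionCore_alt S (i + 1) end_)
termination_by (end_ - start + 1).toNat
decreasing_by
  · have hi := pvBestBound S start end_ (by omega) _ none (by intro x hx; cases hx) i _hb
    omega
  · have hi := pvBestBound S start end_ (by omega) _ none (by intro x hx; cases hx) i _hb
    omega

-- ===== PRECONDITION & SPEC =====

-- Pre_ restricts to A's natural domain: either a trivial window (length < 2, A returns 0
-- before touching the string) or a window of in-range, non-negative indices over lowercase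
-- letters only.  It excludes inputs on which A still returns by accident of its
-- implementation: negative window bounds (Python's negative-index wraparound) and windows
-- containing characters with codes 71–96 or ±out-of-range ones, whose 'ord(c) - ord("a")'
-- index wraps into another letter's counter cell (or raises IndexError for codes ≥ 123 / < 71).
def pvLower (c : Char) : Bool := 97 ≤ c.toNat && c.toNat ≤ 122

def Pre_solutionCore (S : String) (start : Int) (end_ : Int) : Prop :=
  end_ - start + 1 < 2 ∨
  (0 ≤ start ∧ end_ < (S.toList.length : Int) ∧
   (PySem.List.slice S.toList (some start) (some (end_ + 1))).all pvLower = true)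

instance (S : String) (start : Int) (end_ : Int) : Decidable (Pre_solutionCore S start end_) := by
  unfold Pre_solutionCore; infer_instance

def pvWitness_solutionCore : String × Int × Int := ("abacabad", 0, 7)

def Spec_solutionCore (S : String) (start : Int) (end_ : Int) (out : Int) : Prop :=
  out = solutionCore_alt S start end_
instance (S : String) (start : Int) (end_ : Int) (out : Int) : Decidable (Spec_solutionCore S start end_ out) := by
  unfold Spec_solutionCore; infer_instance

-- ===== CLAIM (what is proved, stated in full; the proofs are below) =====
def Claim_equal_solutionCore : Prop :=
  ∀ (S : String) (start : Int) (end_ : Int), Dom_solutionCore S start end_ →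
    Pre_solutionCore S start end_ → Spec_solutionCore S start end_ (solutionCore S start end_)

-- ===== LEMMAS AND PROOFS =====

theorem pvPosMem (S : String) (ch : Char) (e : Int) :
    e ∈ (pvPos S).getD ch [] ↔
      ∃ (k : Nat) (h : k < S.toList.length), e = (k : Int) ∧ S.toList[k] = ch := by
  rw [pvPos_getD]
  simp only [List.mem_map, List.mem_filter, PySem.List.mem_enumerate_iff]
  constructor
  · rintro ⟨p, ⟨⟨k, hk, hp⟩, hch⟩, he⟩
    subst hp
    simp only [beq_iff_eq] at hch
    exact ⟨k, hk, by simpa using he.symm, hch⟩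
  · rintro ⟨k, hk, he, hch⟩
    exact ⟨(0 + (k : Int), S.toList[k]), ⟨⟨k, hk, rfl⟩, by simpa using hch⟩, by simpa using he.symm⟩

theorem pvChar_eq_of_toNat_eq {a b : Char} (h : a.toNat = b.toNat) : a = b :=
  Char.ext (UInt32.toNat_inj.mp h)

theorem pvFindIdx?_congr {α : Type} {p q : α → Bool} :
    ∀ {l : List α}, (∀ x ∈ l, p x = q x) → List.findIdx? p l = List.findIdx? q l := by
  intro l
  induction l with
  | nil => intro _; rfl
  | cons a t ih =>
    intro h
    simp only [List.findIdx?_cons]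
    rw [h a (by simp), ih (fun x hx => h x (by simp [hx]))]

-- slice decomposition: a nonempty in-range slice is its head consed on the rest
theorem pvSliceCons {α : Type} (xs : List α) (a b : Int)
    (h0 : 0 ≤ a) (hab : a < b) (hb : b ≤ (xs.length : Int)) :
    PySem.List.slice xs (some a) (some b) =
      xs[a.toNat]'(by omega) :: PySem.List.slice xs (some (a + 1)) (some b) := by
  rw [PySem.List.slice_of_nonneg xs h0 (by omega) (by omega) hb,
      PySem.List.slice_of_nonneg xs (by omega) (by omega) (by omega) hb]
  rw [List.drop_eq_getElem_cons (by omega : a.toNat < xs.length)]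
  have h1 : b.toNat - a.toNat = (b.toNat - (a + 1).toNat) + 1 := by omega
  have h2 : (a + 1).toNat = a.toNat + 1 := by omega
  rw [h1, h2, List.take_succ_cons]

theorem pvSliceNil {α : Type} (xs : List α) (a b : Int)
    (h0 : 0 ≤ a) (hab : b ≤ a) (hb : 0 ≤ b) :
    PySem.List.slice xs (some a) (some b) = [] := by
  rw [PySem.List.slice_toNat xs h0 hb]
  simp only [List.take_eq_nil_iff, List.drop_eq_nil_iff]
  omega

-- indexing into an in-range slice
theorem pvSliceGet {α : Type} (xs : List α) (a b : Int) (m : Nat)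
    (h0 : 0 ≤ a) (h0b : 0 ≤ b) (hb : b ≤ (xs.length : Int))
    (hm : m < (PySem.List.slice xs (some a) (some b)).length) :
    ∃ (hx : a.toNat + m < xs.length),
      (PySem.List.slice xs (some a) (some b))[m]'hm = xs[a.toNat + m]'hx := by
  have hca : PySem.List.clampIdx xs.length a = min a.toNat xs.length := by
    have h1 : a = ((a.toNat : Nat) : Int) := by omega
    conv_lhs => rw [h1, PySem.List.clampIdx_natCast]
  have hcb : PySem.List.clampIdx xs.length b = min b.toNat xs.length := by
    have h1 : b = ((b.toNat : Nat) : Int) := by omega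
    conv_lhs => rw [h1, PySem.List.clampIdx_natCast]
  have hlen := hm
  rw [PySem.List.length_slice, hca, hcb] at hlen
  have hblen : a.toNat + m < xs.length := by omega
  refine ⟨hblen, ?_⟩
  rw [List.getElem_of_eq (PySem.List.slice_toNat xs h0 h0b) hm]
  rw [List.getElem_take, List.getElem_drop]

-- a foldl over range indices, reading S[i], is a foldl over the corresponding slice
theorem pvRangeFold {β : Type} (xs : List Char) (f : β → Char → β) :
    ∀ (N : Nat) (a b : Int) (init : β), (b - a).toNat ≤ N → 0 ≤ a → a ≤ b → b ≤ (xs.length : Int) →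
    (PySem.List.pyRange a b 1).foldl (fun acc i => f acc (PySem.List.pyGetD xs i 'a')) init =
      (PySem.List.slice xs (some a) (some b)).foldl f init := by
  intro N
  induction N with
  | zero =>
    intro a b init hN h0 hab hb
    have : b ≤ a := by omega
    rw [PySem.List.pyRange_one_eq_nil this, pvSliceNil xs a b h0 this (by omega)]
    rfl
  | succ N ih =>
    intro a b init hN h0 hab hb
    rcases le_or_gt b a with h | h
    · rw [PySem.List.pyRange_one_eq_nil h, pvSliceNil xs a b h0 h (by omega)]
      rfl
    · rw [PySem.List.pyRange_one_cons h, pvSliceCons xs a b h0 h hb]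
      simp only [List.foldl_cons]
      rw [PySem.List.pyGetD_eq_getElem xs 'a' h0 (by omega)]
      exact ih (a + 1) b _ (by omega) (by omega) (by omega) hb

-- A's second loop over the index range is findIdx? over the window, shifted by the left bound
theorem pvFindOdd_spec (L : List Char) (counter : List Int) :
    ∀ (N : Nat) (a b : Int), (b - a).toNat ≤ N → 0 ≤ a → a ≤ b → b ≤ (L.length : Int) →
    pvFindOdd L counter (PySem.List.pyRange a b 1) =
      Option.map (fun (k : Nat) => a + (k : Int))
        (List.findIdx? (fun ch => decide (PySem.Int.mod (PySem.List.pyGetD counter (pvIdx ch) 0) 2 ≠ 0))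
          (PySem.List.slice L (some a) (some b))) := by
  intro N
  induction N with
  | zero =>
    intro a b hN h0 hab hb
    have : b ≤ a := by omega
    rw [PySem.List.pyRange_one_eq_nil this, pvSliceNil L a b h0 this (by omega)]
    rfl
  | succ N ih =>
    intro a b hN h0 hab hb
    rcases le_or_gt b a with h | h
    · rw [PySem.List.pyRange_one_eq_nil h, pvSliceNil L a b h0 h (by omega)]
      rfl
    · rw [PySem.List.pyRange_one_cons h, pvSliceCons L a b h0 h hb]
      simp only [pvFindOdd, List.findIdx?_cons]
      rw [PySem.List.pyGetD_eq_getElem L 'a' h0 (by omega)]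
      by_cases hc : PySem.Int.mod (PySem.List.pyGetD counter (pvIdx (L[a.toNat]'(by omega))) 0) 2 ≠ 0
      · rw [if_pos hc, if_pos (decide_eq_true hc), Option.map_some]
        simp
      · rw [if_neg hc, if_neg (by simpa using hc)]
        rw [ih (a + 1) b (by omega) (by omega) (by omega) hb]
        rcases hfi : List.findIdx? (fun ch => decide (PySem.Int.mod (PySem.List.pyGetD counter (pvIdx ch) 0) 2 ≠ 0))
            (PySem.List.slice L (some (a + 1)) (some b)) with _ | k
        · rfl
        · simp only [Option.map_some]
          congr 1
          push_cast
          ring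

-- A's first loop: counter cell of a lowercase letter = its count in the folded list
-- A's first loop: counter cell of a lowercase letter = its count in the folded list
theorem pvCounter_spec :
    ∀ (l : List Char) (counter : List Int), counter.length = 26 →
    (∀ ch ∈ l, 97 ≤ ch.toNat ∧ ch.toNat ≤ 122) →
    ∀ c : Char, 97 ≤ c.toNat → c.toNat ≤ 122 →
    PySem.List.pyGetD
      (l.foldl (fun counter ch =>
        PySem.List.pySetD counter (pvIdx ch) (PySem.List.pyGetD counter (pvIdx ch) 0 + 1)) counter)
      (pvIdx c) 0
    = PySem.List.pyGetD counter (pvIdx c) 0 + (l.count c : Int) := by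
  intro l
  induction l with
  | nil => intro counter _ _ c _ _; simp
  | cons h t ih =>
    intro counter hlen hlow c hc1 hc2
    have hh := hlow h (by simp)
    simp only [List.foldl_cons]
    rw [ih _ (by rw [PySem.List.length_pySetD]; exact hlen)
          (fun ch hch => hlow ch (by simp [hch])) c hc1 hc2]
    have hidxh : pvIdx h = ((h.toNat - 97 : Nat) : Int) := by simp [pvIdx]; omega
    have hidxc : pvIdx c = ((c.toNat - 97 : Nat) : Int) := by simp [pvIdx]; omega
    rw [hidxh, hidxc, PySem.List.pyGetD_pySetD_natCast counter _ _ _ _ (by omega)]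
    rw [List.count_cons]
    by_cases he : c.toNat - 97 = h.toNat - 97
    · have : h = c := pvChar_eq_of_toNat_eq (by omega)
      rw [if_pos he, this, if_pos (by simp)]
      push_cast
      rw [← hidxc]
      ring
    · have : ¬ (h == c) = true := by
        simp only [beq_iff_eq]
        intro hhc; exact he (by rw [hhc])
      rw [if_neg he, if_neg this]
      push_cast
      rw [← hidxc]
      ring

theorem pvGetD_replicate (j : Int) : PySem.List.pyGetD (List.replicate 26 (0 : Int)) j 0 = 0 := by
  unfold PySem.List.pyGetD
  rcases h : PySem.List.pyGet? (List.replicate 26 (0 : Int)) j with _ | x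
  · rfl
  · have := List.eq_of_mem_replicate (PySem.List.mem_of_pyGet?_eq_some _ h)
    simp [this]

-- countP of a list with a false prefix, a true middle segment [a, b) and a false tail
theorem pvCountPBoundary (l : List Int) (p : Int → Bool) (a b : Nat) (hab : a ≤ b)
    (hb : b ≤ l.length)
    (h1 : ∀ j (h : j < l.length), j < a → p (l[j]'h) = false)
    (h2 : ∀ j (h : j < l.length), a ≤ j → j < b → p (l[j]'h) = true)
    (h3 : ∀ j (h : j < l.length), b ≤ j → p (l[j]'h) = false) :
    l.countP p = b - a := by
  have hdecomp : l = l.take a ++ ((l.drop a).take (b - a) ++ (l.drop a).drop (b - a)) := by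
    rw [List.take_append_drop, List.take_append_drop]
  conv_lhs => rw [hdecomp]
  rw [List.countP_append, List.countP_append]
  have hc1 : (l.take a).countP p = 0 := by
    rw [List.countP_eq_zero]
    intro x hx
    obtain ⟨i, hi, hxi⟩ := List.mem_iff_getElem.mp hx
    have hia : i < a := by
      have := hi; rw [List.length_take] at this; omega
    rw [← hxi, List.getElem_take]
    simp [h1 i (by omega) hia]
  have hc3 : ((l.drop a).drop (b - a)).countP p = 0 := by
    rw [List.countP_eq_zero]
    intro x hx
    obtain ⟨i, hi, hxi⟩ := List.mem_iff_getElem.mp hx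
    rw [← hxi, List.getElem_drop, List.getElem_drop]
    have : a + ((b - a) + i) < l.length := by
      have := hi; simp only [List.length_drop] at this; omega
    simp [h3 (a + ((b - a) + i)) this (by omega)]
  have hc2 : ((l.drop a).take (b - a)).countP p = b - a := by
    have hlen : ((l.drop a).take (b - a)).length = b - a := by
      rw [List.length_take, List.length_drop]; omega
    have hall : ∀ x ∈ (l.drop a).take (b - a), p x = true := by
      intro x hx
      obtain ⟨i, hi, hxi⟩ := List.mem_iff_getElem.mp hx
      have hib : i < b - a := by rw [hlen] at hi; exact hi
      rw [← hxi, List.getElem_take, List.getElem_drop]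
      have : a + i < l.length := by omega
      exact h2 (a + i) this (by omega) (by omega)
    have := List.countP_eq_length.mpr hall
    omega
  omega

-- countP splits over a pointwise disjoint disjunction
theorem pvCountPSplit (p q r : Int → Bool) :
    ∀ (l : List Int), (∀ x ∈ l, p x = (q x || r x) ∧ ¬(q x = true ∧ r x = true)) →
      l.countP p = l.countP q + l.countP r := by
  intro l
  induction l with
  | nil => intro _; rfl
  | cons x t ih =>
    intro h
    obtain ⟨hp, hqr⟩ := h x (by simp)
    rw [List.countP_cons, List.countP_cons, List.countP_cons,
        ih (fun y hy => h y (by simp [hy]))]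
    rcases hq : q x <;> rcases hr : r x <;> simp [hp, hq, hr] at hqr ⊢ <;> omega

-- the window-membership test splits into "is the left end" or "is strictly inside"
theorem pvIntervalSplit (a b x : Int) (hab : a < b) :
    ((decide (a ≤ x) && decide (x < b)) = ((x == a) || (decide (a + 1 ≤ x) && decide (x < b)))) ∧
    ¬((x == a) = true ∧ (decide (a + 1 ≤ x) && decide (x < b)) = true) := by
  constructor
  · by_cases h3 : x = a
    · subst h3
      simp [hab]
    · have hba : (x == a) = false := by simp [h3]
      rw [hba, Bool.false_or]
      have hiff : (a ≤ x) ↔ (a + 1 ≤ x) := by omega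
      rw [decide_eq_decide.mpr hiff]
  · rintro ⟨h1, h2⟩
    simp only [beq_iff_eq] at h1
    simp only [Bool.and_eq_true, decide_eq_true_eq] at h2
    omega

-- interval countP over ch's position list = ch's count in the corresponding window
theorem pvCountBridge (S : String) (ch : Char) :
    ∀ (N : Nat) (a b : Int), (b - a).toNat ≤ N → 0 ≤ a → a ≤ b → b ≤ (S.toList.length : Int) →
    ((pvPos S).getD ch []).countP (fun e => decide (a ≤ e) && decide (e < b)) =
      (PySem.List.slice S.toList (some a) (some b)).count ch := by
  intro N
  induction N with
  | zero =>
    intro a b hN h0 hab hb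
    have hba : b ≤ a := by omega
    rw [pvSliceNil S.toList a b h0 hba (by omega)]
    rw [List.count_nil, List.countP_eq_zero]
    intro x _
    simp only [Bool.and_eq_true, decide_eq_true_eq]
    omega
  | succ N ih =>
    intro a b hN h0 hab hb
    rcases le_or_gt b a with h | h
    · rw [pvSliceNil S.toList a b h0 h (by omega)]
      rw [List.count_nil, List.countP_eq_zero]
      intro x _
      simp only [Bool.and_eq_true, decide_eq_true_eq]
      omega
    · rw [pvSliceCons S.toList a b h0 h hb]
      rw [pvCountPSplit _ (fun e => e == a) (fun e => decide (a + 1 ≤ e) && decide (e < b)) _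
            (fun x _ => ⟨(pvIntervalSplit a b x h).1, (pvIntervalSplit a b x h).2⟩)]
      rw [ih (a + 1) b (by omega) (by omega) (by omega) hb]
      rw [List.count_cons]
      have hnd : ((pvPos S).getD ch []).Nodup := (pvPosSorted S ch).imp ne_of_lt
      have hcnt : ((pvPos S).getD ch []).countP (fun e => e == a) =
          if (S.toList[a.toNat]'(by omega)) = ch then 1 else 0 := by
        have heqc : ((pvPos S).getD ch []).countP (fun e => e == a) =
            ((pvPos S).getD ch []).count a := by
          rw [List.count]
        rw [heqc]
        by_cases hch : (S.toList[a.toNat]'(by omega)) = ch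
        · rw [if_pos hch]
          have hmem : a ∈ (pvPos S).getD ch [] := by
            rw [pvPosMem]
            exact ⟨a.toNat, by omega, by omega, hch⟩
          have hle := List.nodup_iff_count_le_one.mp hnd a
          have hge := List.count_pos_iff.mpr hmem
          omega
        · rw [if_neg hch]
          rw [List.count_eq_zero]
          intro hmem
          rw [pvPosMem] at hmem
          obtain ⟨k, hk, hka, hkc⟩ := hmem
          have : k = a.toNat := by omega
          subst this
          exact hch hkc
      rw [hcnt]
      by_cases hch : (S.toList[a.toNat]'(by omega)) = ch
      · rw [if_pos hch, if_pos (by simpa using hch)]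
        omega
      · rw [if_neg hch, if_neg (by simpa using hch)]
        omega

-- B's per-character work, in closed form: the bisect difference is the window count,
-- and (when that count is nonzero) lst[a] is start + (first offset of ch in the window)
theorem pvCandidate (S : String) (start end_ : Int) (ch : Char)
    (h0 : 0 ≤ start) (hse : start ≤ end_) (hlen : end_ < (S.toList.length : Int)) :
    ((PySem.List.bisectLeft ((pvPos S).getD ch []) (end_ + 1) : Int) -
      (PySem.List.bisectLeft ((pvPos S).getD ch []) start : Int) =
      ((PySem.List.slice S.toList (some start) (some (end_ + 1))).count ch : Int)) ∧
    ((PySem.List.slice S.toList (some start) (some (end_ + 1))).count ch ≠ 0 →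
      ∃ k : Nat, PySem.List.index? (PySem.List.slice S.toList (some start) (some (end_ + 1))) ch = some k ∧
        PySem.List.pyGetD ((pvPos S).getD ch [])
          ((PySem.List.bisectLeft ((pvPos S).getD ch []) start : Nat) : Int) 0 = start + (k : Int)) := by
  set lst := (pvPos S).getD ch [] with hlstdef
  set u := PySem.List.slice S.toList (some start) (some (end_ + 1)) with hudef
  set a := PySem.List.bisectLeft lst start with hadef
  set b := PySem.List.bisectLeft lst (end_ + 1) with hbdef
  obtain ⟨halen, h2a, h3a⟩ := PySem.List.bisectLeft_spec lst start (pvPosSortedLe S ch)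
  obtain ⟨hblen, h2b, h3b⟩ := PySem.List.bisectLeft_spec lst (end_ + 1) (pvPosSortedLe S ch)
  have hab : a ≤ b := pvBisectLe lst start (end_ + 1) (pvPosSortedLe S ch) (by omega)
  have hcount : lst.countP (fun e => decide (start ≤ e) && decide (e < end_ + 1)) = u.count ch := by
    rw [hlstdef, hudef]
    exact pvCountBridge S ch (end_ + 1 - start).toNat start (end_ + 1) le_rfl h0 (by omega) (by omega)
  have hbound : lst.countP (fun e => decide (start ≤ e) && decide (e < end_ + 1)) = b - a := by
    refine pvCountPBoundary lst _ a b hab hblen ?_ ?_ ?_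
    · intro j h hj
      have := h2a j h hj
      simp only [Bool.and_eq_false_iff, decide_eq_false_iff_not]
      left; omega
    · intro j h hja hjb
      have hge := h3a j h hja
      have hlt := h2b j h hjb
      simp only [Bool.and_eq_true, decide_eq_true_eq]
      omega
    · intro j h hj
      have := h3b j h hj
      simp only [Bool.and_eq_false_iff, decide_eq_false_iff_not]
      right; omega
  have hba : (b : Int) - (a : Int) = (u.count ch : Int) := by omega
  refine ⟨hba, ?_⟩
  intro hne
  have haltb : a < b := by omega
  have haltlen : a < lst.length := by omega
  have hjget : PySem.List.pyGetD lst ((a : Nat) : Int) 0 = lst[a] := by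
    rw [PySem.List.pyGetD_natCast, List.getD_eq_getElem _ _ haltlen]
  set j := lst[a] with hjdef
  have hjlo : start ≤ j := h3a a haltlen le_rfl
  have hjhi : j < end_ + 1 := h2b a haltlen haltb
  have hjmem : j ∈ lst := List.getElem_mem haltlen
  obtain ⟨jn, hjn, hjeq, hjch⟩ := (pvPosMem S ch j).mp hjmem
  -- window length
  have hulen : (u.length : Int) = end_ + 1 - start := by
    rw [hudef, PySem.List.length_slice]
    simp only [PySem.List.clampIdx]
    split_ifs <;> omega
  -- the window offset of j
  have hm0 : (j - start).toNat < u.length := by omega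
  have hum0 : u[(j - start).toNat]'hm0 = ch := by
    obtain ⟨hx, hux⟩ := pvSliceGet S.toList start (end_ + 1) (j - start).toNat h0 (by omega) (by omega) hm0
    rw [hux]
    have : start.toNat + (j - start).toNat = jn := by omega
    rw [← hjch]
    congr 1
  -- ch occurs in the window, so index? is some
  have hmem : ch ∈ u := hum0 ▸ List.getElem_mem hm0
  obtain ⟨k, hk⟩ := Option.isSome_iff_exists.mp ((PySem.List.index?_isSome_iff u ch).mpr hmem)
  obtain ⟨hklen, huk, hkmin⟩ := PySem.List.getElem_of_index?_eq_some hk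
  refine ⟨k, hk, ?_⟩
  rw [hjget]
  -- k ≤ j - start (minimality of index?)
  have hkle : (k : Int) ≤ j - start := by
    by_contra hlt
    push_neg at hlt
    have hm0k : (j - start).toNat < k := by omega
    exact hkmin (j - start).toNat hm0k hum0
  -- start + k is a position of ch, so it is in lst at some index ≥ a, hence j ≤ start + k
  have hukpos : (start + (k : Int)) ∈ lst := by
    rw [pvPosMem]
    refine ⟨start.toNat + k, by omega, by omega, ?_⟩
    obtain ⟨hx, hux⟩ := pvSliceGet S.toList start (end_ + 1) k h0 (by omega) (by omega) hklen
    rw [← hux, huk]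
  obtain ⟨i, hi, hieq⟩ := List.mem_iff_getElem.mp hukpos
  have hia : a ≤ i := by
    by_contra hlt
    push_neg at hlt
    have := h2a i hi hlt
    omega
  have hji : j ≤ lst[i] := by
    rcases Nat.eq_or_lt_of_le hia with hEq | hLt
    · rw [hjdef]
      exact le_of_eq (by simp only [hEq])
    · rw [hjdef]
      exact le_of_lt (List.pairwise_iff_getElem.mp (pvPosSorted S ch) a i haltlen hi hLt)
  omega

-- the running-minimum loop: if every emitted candidate is ≥ m and m itself is emitted
-- (or already held), the loop ends at m
theorem pvFoldIfMerge (Q : Char → Prop) [DecidablePred Q] (v : Char → Int) (m : Int) :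
    ∀ (l : List Char) (acc : Option Int),
      (∀ ch ∈ l, Q ch → m ≤ v ch) →
      ((∃ ch ∈ l, Q ch ∧ v ch = m) ∨ acc = some m) →
      (∀ y, acc = some y → m ≤ y) →
      l.foldl (fun best ch => if Q ch then
        (match best with
         | none => some (v ch)
         | some bst => if v ch < bst then some (v ch) else some bst)
        else best) acc = some m := by
  intro l
  induction l with
  | nil =>
    intro acc _ hw _
    rcases hw with ⟨ch, hch, _⟩ | h
    · simp at hch
    · simpa using h
  | cons ch t ih =>
    intro acc hge hw hacc
    simp only [List.foldl_cons]
    by_cases hq : Q ch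
    · rw [if_pos hq]
      have hvch : m ≤ v ch := hge ch (by simp) hq
      have hge' : ∀ c ∈ t, Q c → m ≤ v c := fun c hc h => hge c (by simp [hc]) h
      cases acc with
      | none =>
        have hbnd : ∀ y, some (v ch) = some y → m ≤ y := by
          intro y hy
          have : y = v ch := by simpa using hy.symm
          omega
        rcases hw with ⟨ch', hch', hq', hv'⟩ | hsome
        · rcases List.mem_cons.mp hch' with hEq | hmem
          · rw [hEq] at hv'
            exact ih (some (v ch)) hge' (Or.inr (by rw [hv'])) hbnd
          · exact ih (some (v ch)) hge' (Or.inl ⟨ch', hmem, hq', hv'⟩) hbnd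
        · cases hsome
      | some bst =>
        simp only []
        have hbst := hacc bst rfl
        by_cases hlt : v ch < bst
        · rw [if_pos hlt]
          have hbnd : ∀ y, some (v ch) = some y → m ≤ y := by
            intro y hy
            have : y = v ch := by simpa using hy.symm
            omega
          rcases hw with ⟨ch', hch', hq', hv'⟩ | hsome
          · rcases List.mem_cons.mp hch' with hEq | hmem
            · rw [hEq] at hv'
              exact ih (some (v ch)) hge' (Or.inr (by rw [hv'])) hbnd
            · exact ih (some (v ch)) hge' (Or.inl ⟨ch', hmem, hq', hv'⟩) hbnd
          · have hbm : bst = m := by simpa using hsome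
            exact absurd hlt (by omega)
        · rw [if_neg hlt]
          have hbnd : ∀ y, some bst = some y → m ≤ y := by
            intro y hy
            have : y = bst := by simpa using hy.symm
            omega
          rcases hw with ⟨ch', hch', hq', hv'⟩ | hsome
          · rcases List.mem_cons.mp hch' with hEq | hmem
            · rw [hEq] at hv'
              have hbm : bst = m := by omega
              exact ih (some bst) hge' (Or.inr (by rw [hbm])) hbnd
            · exact ih (some bst) hge' (Or.inl ⟨ch', hmem, hq', hv'⟩) hbnd
          · exact ih (some bst) hge' (Or.inr hsome) hbnd
    · rw [if_neg hq]
      refine ih _ (fun c hc h => hge c (by simp [hc]) h) ?_ hacc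
      rcases hw with ⟨ch', hch', hq', hv'⟩ | hsome
      · rcases List.mem_cons.mp hch' with hEq | hmem
        · subst hEq; exact absurd hq' hq
        · exact Or.inl ⟨ch', hmem, hq', hv'⟩
      · exact Or.inr hsome

-- the running-minimum loop stays None-- the running-minimum loop stays None when no character passes the parity test
theorem pvFoldIfMerge_none (Q : Char → Prop) [DecidablePred Q] (v : Char → Int) :
    ∀ (l : List Char), (∀ ch ∈ l, ¬ Q ch) →
      l.foldl (fun best ch => if Q ch then
        (match best with
         | none => some (v ch)
         | some bst => if v ch < bst then some (v ch) else some bst)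
        else best) none = none := by
  intro l
  induction l with
  | nil => intro _; rfl
  | cons ch t ih =>
    intro h
    simp only [List.foldl_cons, if_neg (h ch (by simp))]
    exact ih (fun c hc => h c (by simp [hc]))

-- window facts used when carving out the two sub-windows
theorem pvSliceLeft {α : Type} (xs : List α) (start b c : Int)
    (h0 : 0 ≤ start) (hsb : start ≤ b) (hbc : b ≤ c) (hc : c ≤ (xs.length : Int)) :
    ∀ x ∈ PySem.List.slice xs (some start) (some b), x ∈ PySem.List.slice xs (some start) (some c) := by
  intro x hx
  rw [PySem.List.slice_of_nonneg xs h0 (by omega) (by omega) (by omega)] at hx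
  rw [PySem.List.slice_of_nonneg xs h0 (by omega) (by omega) hc]
  have : List.take (b.toNat - start.toNat) (List.drop start.toNat xs) =
      List.take (b.toNat - start.toNat) (List.take (c.toNat - start.toNat) (List.drop start.toNat xs)) := by
    rw [List.take_take]
    congr 1
    omega
  rw [this] at hx
  exact List.take_subset _ _ hx

theorem pvSliceRight {α : Type} (xs : List α) (start a c : Int)
    (h0 : 0 ≤ start) (hsa : start ≤ a) (hac : a ≤ c) (hc : c ≤ (xs.length : Int)) :
    ∀ x ∈ PySem.List.slice xs (some a) (some c), x ∈ PySem.List.slice xs (some start) (some c) := by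
  intro x hx
  rw [PySem.List.slice_of_nonneg xs (by omega) (by omega) (by omega) hc] at hx
  rw [PySem.List.slice_of_nonneg xs h0 (by omega) (by omega) hc]
  have hdrop : List.drop a.toNat xs = List.drop (a.toNat - start.toNat) (List.drop start.toNat xs) := by
    rw [List.drop_drop]
    congr 1
    omega
  rw [hdrop] at hx
  have heq : List.take (c.toNat - a.toNat) (List.drop (a.toNat - start.toNat) (List.drop start.toNat xs)) =
      List.drop (a.toNat - start.toNat) (List.take (c.toNat - start.toNat) (List.drop start.toNat xs)) := by
    rw [List.drop_take]
    congr 1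
    omega
  rw [heq] at hx
  exact List.drop_subset _ _ hx

theorem pvWindowLen {α : Type} (xs : List α) (a b : Int)
    (h0 : 0 ≤ a) (hab : a ≤ b) (hb : b ≤ (xs.length : Int)) :
    ((PySem.List.slice xs (some a) (some b)).length : Int) = b - a := by
  simp only [PySem.List.length_slice, PySem.List.clampIdx]
  split_ifs <;> omega

-- B's key loop computes exactly Option.map (start + ·) of A's first-odd-offset search
theorem pvFold_spec (S : String) (start end_ : Int)
    (h0 : 0 ≤ start) (hse : start ≤ end_) (hlen : end_ < (S.toList.length : Int)) :
    ((pvPos S).keys).foldl (pvStep S start end_) none =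
      Option.map (fun (k : Nat) => start + (k : Int))
        (List.findIdx? (fun ch => decide (PySem.Int.mod
            (((PySem.List.slice S.toList (some start) (some (end_ + 1))).count ch : Int)) 2 ≠ 0))
          (PySem.List.slice S.toList (some start) (some (end_ + 1)))) := by
  set u := PySem.List.slice S.toList (some start) (some (end_ + 1)) with hudef
  -- the step function in if/merge shape
  have hstep : pvStep S start end_ = fun best ch =>
      if PySem.Int.mod ((PySem.List.bisectLeft ((pvPos S).getD ch []) (end_ + 1) : Int) -
          (PySem.List.bisectLeft ((pvPos S).getD ch []) start : Int)) 2 ≠ 0 then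
        (match best with
         | none => some (PySem.List.pyGetD ((pvPos S).getD ch [])
             ((PySem.List.bisectLeft ((pvPos S).getD ch []) start : Nat) : Int) 0)
         | some bst => if PySem.List.pyGetD ((pvPos S).getD ch [])
             ((PySem.List.bisectLeft ((pvPos S).getD ch []) start : Nat) : Int) 0 < bst
             then some (PySem.List.pyGetD ((pvPos S).getD ch [])
               ((PySem.List.bisectLeft ((pvPos S).getD ch []) start : Nat) : Int) 0)
             else some bst)
      else best := rfl
  -- the parity test equals oddness of the window count
  have hQ : ∀ ch : Char,
      (PySem.Int.mod ((PySem.List.bisectLeft ((pvPos S).getD ch []) (end_ + 1) : Int) -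
          (PySem.List.bisectLeft ((pvPos S).getD ch []) start : Int)) 2 ≠ 0) ↔
      PySem.Int.mod ((u.count ch : Int)) 2 ≠ 0 := by
    intro ch
    rw [(pvCandidate S start end_ ch h0 hse hlen).1]
  -- keys of pos = the distinct characters of S
  have hkeys : ∀ c : Char, c ∈ (pvPos S).keys ↔ c ∈ S.toList := by
    intro c
    unfold pvPos
    rw [PySem.Dict.keys_foldl_modify_key (PySem.List.enumerate S.toList 0) (fun p => p.2) []
          (fun _ p => (fun l => l ++ [p.1])) PySem.Dict.empty]
    rw [PySem.Dict.keys_empty, PySem.Set.mem_update, PySem.List.map_snd_enumerate]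
    simp
  rw [hstep]
  rcases hF : List.findIdx? (fun ch => decide (PySem.Int.mod ((u.count ch : Int)) 2 ≠ 0)) u
    with _ | k
  · -- no odd character anywhere
    rw [Option.map_none]
    apply pvFoldIfMerge_none
    intro ch _ hq
    rw [hQ ch] at hq
    have hne : u.count ch ≠ 0 := by
      intro h0c
      rw [h0c] at hq
      exact hq (by decide)
    have hmem : ch ∈ u := List.count_pos_iff.mp (Nat.pos_of_ne_zero hne)
    have := List.findIdx?_eq_none_iff.mp hF ch hmem
    simp only [decide_eq_false_iff_not] at this
    exact this hq
  · -- first odd offset k: the loop's minimum is start + k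
    rw [Option.map_some]
    obtain ⟨hklen, hPk, hbefore⟩ := List.findIdx?_eq_some_iff_getElem.mp hF
    apply pvFoldIfMerge
    · -- every emitted candidate is ≥ start + k
      intro ch _ hq
      rw [hQ ch] at hq
      have hne : u.count ch ≠ 0 := by
        intro h0c
        rw [h0c] at hq
        exact hq (by decide)
      obtain ⟨k', hk', hv'⟩ := (pvCandidate S start end_ ch h0 hse hlen).2 hne
      rw [hv']
      obtain ⟨hk'len, huk', _⟩ := PySem.List.getElem_of_index?_eq_some hk'
      have hkk' : k ≤ k' := by
        by_contra hlt
        push_neg at hlt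
        have := hbefore k' hlt
        rw [huk'] at this
        simp only [decide_eq_true_eq] at this
        exact this hq
      omega
    · -- the candidate of u[k] is exactly start + k
      left
      have hmemu : (u[k]'hklen) ∈ u := List.getElem_mem hklen
      refine ⟨u[k]'hklen, ?_, ?_, ?_⟩
      · rw [hkeys]
        exact PySem.List.mem_of_mem_slice _ _ _ hmemu
      · rw [hQ]
        simpa using hPk
      · have hne : u.count (u[k]'hklen) ≠ 0 := by
          intro h0c
          rw [decide_eq_true_iff, h0c] at hPk
          exact hPk (by decide)
        obtain ⟨k', hk', hv'⟩ := (pvCandidate S start end_ (u[k]'hklen) h0 hse hlen).2 hne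
        obtain ⟨hk'len, huk', hkmin⟩ := PySem.List.getElem_of_index?_eq_some hk'
        have hle : k' ≤ k := by
          by_contra hlt
          push_neg at hlt
          exact hkmin k hlt rfl
        have hge : k ≤ k' := by
          by_contra hlt
          push_neg at hlt
          have := hbefore k' hlt
          rw [huk'] at this
          simp only [decide_eq_true_eq] at this
          exact this (by simpa using hPk)
        have : k' = k := by omega
        rw [hv', this]
    · intro y hy
      cases hy

-- the main induction: A = B on every admissible window of measure ≤ N
theorem pvMain : ∀ (N : Nat) (S : String) (start end_ : Int),
    (end_ - start + 1).toNat ≤ N →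
    Pre_solutionCore S start end_ →
    solutionCore S start end_ = solutionCore_alt S start end_ := by
  intro N
  induction N with
  | zero =>
    intro S start end_ hN _
    have h2 : end_ - start + 1 < 2 := by omega
    rw [solutionCore.eq_def, solutionCore_alt.eq_def]
    simp only [dif_pos h2]
  | succ N ih =>
    intro S start end_ hN hP
    by_cases h2 : end_ - start + 1 < 2
    · rw [solutionCore.eq_def, solutionCore_alt.eq_def]
      simp only [dif_pos h2]
    · obtain ⟨hs, he, hlowb⟩ := hP.resolve_left h2
      have hlow : ∀ c ∈ PySem.List.slice S.toList (some start) (some (end_ + 1)),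
          97 ≤ c.toNat ∧ c.toNat ≤ 122 := by
        intro c hc
        have h := List.all_eq_true.mp hlowb c hc
        simp only [pvLower, Bool.and_eq_true, decide_eq_true_eq] at h
        exact h
      have hend : end_ + 1 ≤ (S.toList.length : Int) := by omega
      have hwlen := pvWindowLen S.toList start (end_ + 1) hs (by omega) hend
      -- A's counter loop over indices is a fold over the window
      have hfold := pvRangeFold S.toList
        (fun counter ch =>
          PySem.List.pySetD counter (pvIdx ch) (PySem.List.pyGetD counter (pvIdx ch) 0 + 1))
        (end_ + 1 - start).toNat start (end_ + 1) (List.replicate 26 (0 : Int)) le_rfl hs (by omega) hend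
      beta_reduce at hfold
      -- A's scan is findIdx? of the odd-counter test over the window
      have hspec := pvFindOdd_spec S.toList
        ((PySem.List.slice S.toList (some start) (some (end_ + 1))).foldl
          (fun counter ch =>
            PySem.List.pySetD counter (pvIdx ch) (PySem.List.pyGetD counter (pvIdx ch) 0 + 1))
          (List.replicate 26 (0 : Int)))
        (end_ + 1 - start).toNat start (end_ + 1) le_rfl hs (by omega) hend
      -- the counter test on window members is the odd-count test
      have hcongr : List.findIdx?
          (fun ch => decide (PySem.Int.mod (PySem.List.pyGetD
            ((PySem.List.slice S.toList (some start) (some (end_ + 1))).foldl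
              (fun counter ch =>
                PySem.List.pySetD counter (pvIdx ch) (PySem.List.pyGetD counter (pvIdx ch) 0 + 1))
              (List.replicate 26 (0 : Int))) (pvIdx ch) 0) 2 ≠ 0))
          (PySem.List.slice S.toList (some start) (some (end_ + 1))) =
          List.findIdx?
            (fun ch => decide (PySem.Int.mod
              (((PySem.List.slice S.toList (some start) (some (end_ + 1))).count ch : Int)) 2 ≠ 0))
            (PySem.List.slice S.toList (some start) (some (end_ + 1))) := by
        apply pvFindIdx?_congr
        intro ch hch
        rw [pvCounter_spec _ (List.replicate 26 (0 : Int)) (by simp) hlow ch (hlow ch hch).1 (hlow ch hch).2,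
            pvGetD_replicate, zero_add]
      rw [hcongr] at hspec
      have hBfold := pvFold_spec S start end_ hs (by omega) he
      rw [solutionCore.eq_def, solutionCore_alt.eq_def]
      simp only [dif_neg h2]
      rcases hF : List.findIdx?
          (fun ch => decide (PySem.Int.mod
            (((PySem.List.slice S.toList (some start) (some (end_ + 1))).count ch : Int)) 2 ≠ 0))
          (PySem.List.slice S.toList (some start) (some (end_ + 1))) with _ | k
      · -- no odd letter: both return the window length
        rw [hF] at hspec hBfold
        simp only [Option.map_none] at hspec hBfold
        split
        · next i heqA =>
          have heqA' : pvFindOdd S.toList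
              ((PySem.List.slice S.toList (some start) (some (end_ + 1))).foldl
                (fun counter ch =>
                  PySem.List.pySetD counter (pvIdx ch) (PySem.List.pyGetD counter (pvIdx ch) 0 + 1))
                (List.replicate 26 (0 : Int)))
              (PySem.List.pyRange start (end_ + 1)) = some i := by
            rw [← hfold]; exact heqA
          rw [hspec] at heqA'
          exact absurd heqA' (by simp)
        · next _ =>
          split
          · next => rfl
          · next i heqB =>
            rw [hBfold] at heqB
            simp at heqB
      · -- odd letter exists: both recurse at i = start + k
        rw [hF] at hspec hBfold
        simp only [Option.map_some] at hspec hBfold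
        obtain ⟨hklen, _⟩ := List.findIdx?_eq_some_iff_findIdx_eq.mp hF
        have hwl : ((PySem.List.slice S.toList (some start) (some (end_ + 1))).length : Int) =
            end_ + 1 - start := hwlen
        have hkn : (k : Int) < end_ - start + 1 := by omega
        have hPreL : Pre_solutionCore S start (start + (k : Int) - 1) := by
          by_cases htriv : (start + (k : Int) - 1) - start + 1 < 2
          · exact Or.inl htriv
          · refine Or.inr ⟨hs, by omega, ?_⟩
            rw [List.all_eq_true]
            intro c hc
            simp only [pvLower, Bool.and_eq_true, decide_eq_true_eq]
            apply hlow
            have heq : start + (k : Int) - 1 + 1 = start + (k : Int) := by ring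
            rw [heq] at hc
            exact pvSliceLeft S.toList start (start + (k : Int)) (end_ + 1) hs (by omega)
              (by omega) hend c hc
        have hPreR : Pre_solutionCore S (start + (k : Int) + 1) end_ := by
          by_cases htriv : end_ - (start + (k : Int) + 1) + 1 < 2
          · exact Or.inl htriv
          · refine Or.inr ⟨by omega, he, ?_⟩
            rw [List.all_eq_true]
            intro c hc
            simp only [pvLower, Bool.and_eq_true, decide_eq_true_eq]
            apply hlow
            exact pvSliceRight S.toList start (start + (k : Int) + 1) (end_ + 1) hs (by omega)
              (by omega) hend c hc
        have hIHL := ih S start (start + (k : Int) - 1) (by omega) hPreL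
        have hIHR := ih S (start + (k : Int) + 1) end_ (by omega) hPreR
        split
        · next i heqA =>
          have heqA' : pvFindOdd S.toList
              ((PySem.List.slice S.toList (some start) (some (end_ + 1))).foldl
                (fun counter ch =>
                  PySem.List.pySetD counter (pvIdx ch) (PySem.List.pyGetD counter (pvIdx ch) 0 + 1))
                (List.replicate 26 (0 : Int)))
              (PySem.List.pyRange start (end_ + 1)) = some i := by
            rw [← hfold]; exact heqA
          rw [hspec] at heqA'
          have hi : i = start + (k : Int) := by
            have := heqA'.symm
            simpa using this
          subst hi
          split
          · next heqB => rw [hBfold] at heqB; exact absurd heqB (by simp)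
          · next m heqB =>
            rw [hBfold] at heqB
            have hm : m = start + (k : Int) := by simpa using heqB.symm
            subst hm
            rw [hIHL, hIHR]
        · next heqA =>
          have heqA' : pvFindOdd S.toList
              ((PySem.List.slice S.toList (some start) (some (end_ + 1))).foldl
                (fun counter ch =>
                  PySem.List.pySetD counter (pvIdx ch) (PySem.List.pyGetD counter (pvIdx ch) 0 + 1))
                (List.replicate 26 (0 : Int)))
              (PySem.List.pyRange start (end_ + 1)) = none := by
            rw [← hfold]; exact heqA
          rw [hspec] at heqA'
          exact absurd heqA' (by simp)

-- ===== VERDICT (by name: the statement is the Claim_ definition above) =====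
theorem solutionCore_spec : Claim_equal_solutionCore := by
  intro S start end_ _hD hP
  unfold Spec_solutionCore
  exact pvMain (end_ - start + 1).toNat S start end_ le_rfl hP
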